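-- pv_equiv track=rewrite | github.com/jffbrwn2/entailment-trees | agent_system/claim_evaluator.py | _validate_evidence_format
-- ===== SOURCE A (Python) =====
-- from typing import Optional, Dict, Any
--
-- def _validate_evidence_format(evidence_item: dict) -> tuple[bool, Optional[str]]:
--     """
--     Validate evidence item format according to hypergraph schema.
--
--     Args:
--         evidence_item: Evidence dictionary to validate
--
--     Returns:
--         Tuple of (is_valid, error_message)
--     """
--     # Check type field
--     if 'type' not in evidence_item:
--         return False, "Missing required field 'type'"
--
--     evidence_type = evidence_item['type']
--     allowed_types = ['simulation', 'literature', 'calculation']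
--
--     if evidence_type not in allowed_types:
--         return False, f"Invalid evidence type '{evidence_type}'. Must be one of: {', '.join(allowed_types)}"
--
--     # Type-specific validation
--     if evidence_type == 'simulation':
--         required = ['source', 'lines', 'code']
--         for field in required:
--             if field not in evidence_item:
--                 return False, f"Simulation evidence missing required field '{field}'"
--
--     elif evidence_type == 'literature':
--         required = ['source', 'reference_text']
--         for field in required:
--             if field not in evidence_item:
--                 return False, f"Literature evidence missing required field '{field}'"
--
--     elif evidence_type == 'calculation':
--         required = ['equations', 'program']
--         for field in required:
--             if field not in evidence_item:
--                 return False, f"Calculation evidence missing required field '{field}'"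
--
--     return True, None
-- ===== SOURCE B (Python) =====
-- from typing import Optional
--
-- # Flat (type, field) requirement relation; the message prefix is derived from the
-- # type itself by capitalising its first letter instead of being stored per type.
-- _RULES = [
--     ('simulation', 'source'), ('simulation', 'lines'), ('simulation', 'code'),
--     ('literature', 'source'), ('literature', 'reference_text'),
--     ('calculation', 'equations'), ('calculation', 'program'),
-- ]
--
-- def _validate_evidence_format(evidence_item: dict) -> tuple[bool, Optional[str]]:
--     if 'type' not in evidence_item:
--         return False, "Missing required field 'type'"
--     t = evidence_item['type']
--     if all(rt != t for rt, _ in _RULES):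
--         allowed = dict.fromkeys(rt for rt, _ in _RULES)
--         return False, f"Invalid evidence type '{t}'. Must be one of: {', '.join(allowed)}"
--     for rt, field in _RULES:
--         if rt == t and field not in evidence_item:
--             prefix = t[:1].upper() + t[1:]
--             return False, f"{prefix} evidence missing required field '{field}'"
--     return True, None
-- ===== Notes on version B (the rewrite author's own statement) =====
-- stated objective: simpler
-- what changed: Replaces the nested per-type if/elif branches and their three copies of the field loop with one flat (type, field) requirement relation scanned in a single pass, deriving the message prefix by capitalising the type and the allowed-types list by order-preserving dedup of the relation's first column.
import Mathlib
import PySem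

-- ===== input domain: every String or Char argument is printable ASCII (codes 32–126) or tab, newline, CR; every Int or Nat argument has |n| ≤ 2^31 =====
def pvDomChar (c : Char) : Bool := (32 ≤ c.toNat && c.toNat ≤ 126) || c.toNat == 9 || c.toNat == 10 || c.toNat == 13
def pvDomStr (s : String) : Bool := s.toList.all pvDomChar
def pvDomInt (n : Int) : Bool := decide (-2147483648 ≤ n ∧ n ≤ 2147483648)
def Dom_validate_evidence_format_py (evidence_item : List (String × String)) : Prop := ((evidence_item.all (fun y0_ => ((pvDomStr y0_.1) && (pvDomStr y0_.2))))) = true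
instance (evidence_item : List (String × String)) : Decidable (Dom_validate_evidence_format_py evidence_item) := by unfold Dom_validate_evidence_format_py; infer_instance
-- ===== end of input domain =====

-- B flattens the per-type branches into one (type, field) requirement relation
-- scanned once, deriving the message prefix by capitalising the type (objective: simpler).
-- ===== PORT A =====
-- key membership / lookup on the dict (association list, first match)
def pvLookup (evidence_item : List (String × String)) (k : String) : Option String :=
  (evidence_item.find? (fun p => p.1 == k)).map (·.2)

-- 'for field in required: if field not in evidence_item: return …' (simulation branch)
def aSimLoop (evidence_item : List (String × String)) : List String → Option (Bool × Option String)
  | [] => none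
  | f :: rest =>
    if (pvLookup evidence_item f).isNone then
      some (false, some ("Simulation evidence missing required field '" ++ f ++ "'"))
    else aSimLoop evidence_item rest

-- the same loop in the literature branch
def aLitLoop (evidence_item : List (String × String)) : List String → Option (Bool × Option String)
  | [] => none
  | f :: rest =>
    if (pvLookup evidence_item f).isNone then
      some (false, some ("Literature evidence missing required field '" ++ f ++ "'"))
    else aLitLoop evidence_item rest

-- the same loop in the calculation branch
def aCalcLoop (evidence_item : List (String × String)) : List String → Option (Bool × Option String)
  | [] => none
  | f :: rest =>
    if (pvLookup evidence_item f).isNone then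
      some (false, some ("Calculation evidence missing required field '" ++ f ++ "'"))
    else aCalcLoop evidence_item rest

def validate_evidence_format_py (evidence_item : List (String × String)) : Bool × Option String :=
  match pvLookup evidence_item "type" with
  | none => (false, some "Missing required field 'type'")
  | some evidence_type =>
    let allowed_types := ["simulation", "literature", "calculation"]
    if ¬ allowed_types.contains evidence_type then
      (false, some ("Invalid evidence type '" ++ evidence_type ++ "'. Must be one of: "
                    ++ String.intercalate ", " allowed_types))
    else if evidence_type == "simulation" then
      match aSimLoop evidence_item ["source", "lines", "code"] with
      | some r => r
      | none => (true, none)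
    else if evidence_type == "literature" then
      match aLitLoop evidence_item ["source", "reference_text"] with
      | some r => r
      | none => (true, none)
    else if evidence_type == "calculation" then
      match aCalcLoop evidence_item ["equations", "program"] with
      | some r => r
      | none => (true, none)
    else (true, none)

-- ===== PORT B =====
-- flat (type, field) requirement relation (Source B's _RULES)
def bRules : List (String × String) :=
  [("simulation", "source"), ("simulation", "lines"), ("simulation", "code"),
   ("literature", "source"), ("literature", "reference_text"),
   ("calculation", "equations"), ("calculation", "program")]

def validate_evidence_format_py_alt (evidence_item : List (String × String)) : Bool × Option String :=
  match pvLookup evidence_item "type" with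
  | none => (false, some "Missing required field 'type'")
  | some t =>
    if bRules.all (fun r => r.1 != t) then
      -- dict.fromkeys = distinct keys in first-appearance order
      (false, some ("Invalid evidence type '" ++ t ++ "'. Must be one of: "
                    ++ String.intercalate ", " (PySem.Set.ofList (bRules.map (·.1)))))
    else
      -- 'for rt, field in _RULES: if rt == t and field not in evidence_item: return …'
      match bRules.find? (fun r => r.1 == t && (pvLookup evidence_item r.2).isNone) with
      | some r =>
        -- prefix = t[:1].upper() + t[1:]
        let pfx := PySem.Str.upper (PySem.Str.slice t none (some 1)) ++ PySem.Str.slice t (some 1) none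
        (false, some (pfx ++ " evidence missing required field '" ++ r.2 ++ "'"))
      | none => (true, none)

-- ===== PRECONDITION & SPEC =====
def Spec_validate_evidence_format_py (evidence_item : List (String × String)) (out : Bool × Option String) : Prop := out = validate_evidence_format_py_alt evidence_item
instance (evidence_item : List (String × String)) (out : Bool × Option String) : Decidable (Spec_validate_evidence_format_py evidence_item out) := by unfold Spec_validate_evidence_format_py; infer_instance

-- ===== CLAIM (what is proved, stated in full; the proofs are below) =====
def Claim_equal_validate_evidence_format_py : Prop := ∀ (evidence_item : List (String × String)), Dom_validate_evidence_format_py evidence_item → Spec_validate_evidence_format_py evidence_item (validate_evidence_format_py evidence_item)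

-- ===== LEMMAS AND PROOFS =====

-- ===== VERDICT (by name: the statement is the Claim_ definition above) =====
theorem validate_evidence_format_py_spec : Claim_equal_validate_evidence_format_py := by
  intro e _
  unfold Spec_validate_evidence_format_py validate_evidence_format_py validate_evidence_format_py_alt
  cases h : pvLookup e "type" with
  | none => simp
  | some t =>
    by_cases h1 : t = "simulation"
    · subst h1
      cases hs : pvLookup e "source" <;> cases hl : pvLookup e "lines" <;> cases hc : pvLookup e "code" <;>
        simp [aSimLoop, bRules, List.find?, List.all, hs, hl, hc] <;> decide
    · by_cases h2 : t = "literature"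
      · subst h2
        cases hs : pvLookup e "source" <;> cases hr : pvLookup e "reference_text" <;>
          simp [aLitLoop, bRules, List.find?, List.all, hs, hr] <;> decide
      · by_cases h3 : t = "calculation"
        · subst h3
          cases he : pvLookup e "equations" <;> cases hp : pvLookup e "program" <;>
            simp [aCalcLoop, bRules, List.find?, List.all, he, hp] <;> decide
        · have b1 : (t == "simulation") = false := by simp [h1]
          have b2 : (t == "literature") = false := by simp [h2]
          have b3 : (t == "calculation") = false := by simp [h3]
          have c1 : ("simulation" == t) = false := by simp [Ne.symm h1]
          have c2 : ("literature" == t) = false := by simp [Ne.symm h2]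
          have c3 : ("calculation" == t) = false := by simp [Ne.symm h3]
          have hset : PySem.Set.ofList ["simulation", "simulation", "simulation", "literature", "literature", "calculation", "calculation"] = ["simulation", "literature", "calculation"] := by decide
          simp [bRules, List.find?, List.all, List.contains, List.elem, b1, b2, b3, c1, c2, c3, hset]
          exact ⟨Ne.symm h1, Ne.symm h2, Ne.symm h3⟩
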